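-- pv_equiv track=rewrite | github.com/Doggzone/pppython | solution/chap6sol/chap6sol.py | longest_ascending_sublist
-- ===== SOURCE A (Python) =====
-- def ascending(ns):
--     if len(ns) <= 1:
--         return False
--     else:
--         front = ns[0]
--         for n in ns[1:]:
--             if front >= n:
--                 return False
--             front = n
--         return True
--
-- def sublists(ns):
--     def get(k,ns):
--         subs = []
--         for i in range(len(ns)-k+1):
--             subs.append(ns[i:i+k])
--         return subs
--     subs = [[]]
--     for k in range(1,len(ns)):
--         subs += get(k,ns)
--     if ns != []:
--         subs.append(ns)
--     return subs
--
-- def ascending_sublists(ns):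
--     ascs = []
--     for sub in sublists(ns):
--         if ascending(sub):
--             ascs.append(sub)
--     return ascs
--
-- def longest_ascending_sublist(ns):
--     ascs = ascending_sublists(ns)
--     if ascs != []:
--         index = len(ascs) - 1
--         while index != 0 and len(ascs[index]) == len(ascs[index-1]):
--             index -= 1
--         return ascs[index]
--     else:
--         return []
-- ===== SOURCE B (Python) =====
-- def longest_ascending_sublist(ns):
--     # One pass over the values, maintaining the current strictly-ascending run
--     # and the best (leftmost longest) run seen so far.
--     best = []
--     run = []
--     prev = None
--     for x in ns:
--         if prev is not None and prev < x:
--             run = run + [x]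
--         else:
--             run = [x]
--         if len(run) > len(best):
--             best = run
--         prev = x
--     return best if len(best) >= 2 else []
-- ===== Notes on version B (the rewrite author's own statement) =====
-- stated objective: faster
-- what changed: A enumerates every contiguous sublist of every length, filters the ascending ones and walks back through that list to pick the leftmost longest; B makes a single left-to-right pass maintaining the current strictly-ascending run and the best (leftmost longest) run seen so far.
import Mathlib
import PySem

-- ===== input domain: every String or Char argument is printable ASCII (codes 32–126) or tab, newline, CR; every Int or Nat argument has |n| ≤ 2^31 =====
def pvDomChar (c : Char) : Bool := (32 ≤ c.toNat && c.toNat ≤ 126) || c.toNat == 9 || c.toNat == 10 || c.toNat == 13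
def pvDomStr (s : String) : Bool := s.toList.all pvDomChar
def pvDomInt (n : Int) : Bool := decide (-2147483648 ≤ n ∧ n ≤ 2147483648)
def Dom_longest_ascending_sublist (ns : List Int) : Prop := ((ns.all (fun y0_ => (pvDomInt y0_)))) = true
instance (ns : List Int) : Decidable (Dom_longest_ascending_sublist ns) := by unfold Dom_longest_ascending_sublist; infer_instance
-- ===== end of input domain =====

-- B replaces A's generate-all-sublists-then-filter cascade by a single left-to-right pass
-- maintaining the current strictly-ascending run and the best (leftmost longest) run so far.

-- ===== PORT A =====

-- loop of ascending(): 'front = ns[0]; for n in ns[1:]: ...'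
def ascLoopA (front : Int) : List Int → Bool
  | [] => true
  | n :: rest => if front ≥ n then false else ascLoopA n rest

-- ascending(ns)
def ascendingA (ns : List Int) : Bool :=
  if ns.length ≤ 1 then false
  else match ns with
    | [] => false            -- unreachable (length ≥ 2)
    | f :: rest => ascLoopA f rest

-- inner helper get(k, ns) of sublists(): collects ns[i:i+k] for i in range(len(ns)-k+1)
def getWinsA (k : Int) (ns : List Int) : List (List Int) :=
  (PySem.List.pyRange 0 ((ns.length : Int) - k + 1) 1).foldl
    (fun subs i => subs ++ [PySem.List.slice ns (some i) (some (i + k))]) []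

-- sublists(ns)
def sublistsA (ns : List Int) : List (List Int) :=
  let subs := (PySem.List.pyRange 1 (ns.length : Int) 1).foldl
    (fun subs k => subs ++ getWinsA k ns) [[]]
  if ns ≠ [] then subs ++ [ns] else subs

-- ascending_sublists(ns)
def ascendingSublistsA (ns : List Int) : List (List Int) :=
  (sublistsA ns).foldl (fun ascs sub => if ascendingA sub then ascs ++ [sub] else ascs) []

-- the while loop: 'while index != 0 and len(ascs[index]) == len(ascs[index-1]): index -= 1'
def lasIdxA (ascs : List (List Int)) : Nat → Nat
  | 0 => 0
  | i + 1 => if (ascs.getD (i + 1) []).length = (ascs.getD i []).length then lasIdxA ascs i else i + 1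

def longest_ascending_sublist (ns : List Int) : List Int :=
  let ascs := ascendingSublistsA ns
  if ascs ≠ [] then ascs.getD (lasIdxA ascs (ascs.length - 1)) [] else []

-- ===== PORT B =====

-- loop body of B: update (best, run, prev) with the next element x
def stepB (st : List Int × List Int × Option Int) (x : Int) : List Int × List Int × Option Int :=
  let run' := match st.2.2 with
    | some p => if p < x then st.2.1 ++ [x] else [x]
    | none => [x]
  let best' := if st.1.length < run'.length then run' else st.1
  (best', run', some x)

def longest_ascending_sublist_alt (ns : List Int) : List Int :=
  let st := ns.foldl stepB ([], [], none)
  if 2 ≤ st.1.length then st.1 else []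

-- ===== PRECONDITION & SPEC =====
def Spec_longest_ascending_sublist (ns : List Int) (out : List Int) : Prop := out = longest_ascending_sublist_alt ns
instance (ns : List Int) (out : List Int) : Decidable (Spec_longest_ascending_sublist ns out) := by unfold Spec_longest_ascending_sublist; infer_instance

-- ===== CLAIM (what is proved, stated in full; the proofs are below) =====
def Claim_equal_longest_ascending_sublist : Prop := ∀ (ns : List Int), Dom_longest_ascending_sublist ns → Spec_longest_ascending_sublist ns (longest_ascending_sublist ns)

-- ===== LEMMAS AND PROOFS =====

-- 'w is a strictly ascending contiguous sublist of ns starting at position i'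
def AscAt (ns : List Int) (i : Nat) (w : List Int) : Prop :=
  ∃ u v, ns = u ++ w ++ v ∧ u.length = i ∧ w.IsChain (· < ·)

-- the common specification both programs satisfy: [] if there is no ascending window of
-- length ≥ 2, else the leftmost window of maximal length
def PSpec (ns out : List Int) : Prop :=
  (out = [] ∧ ∀ i w, AscAt ns i w → w.length ≤ 1) ∨
  (2 ≤ out.length ∧ ∃ i, AscAt ns i out ∧
      (∀ j w, AscAt ns j w → w.length ≤ out.length) ∧
      (∀ j w, AscAt ns j w → w.length = out.length → i ≤ j))

theorem ascAt_elim {ns : List Int} {i : Nat} {w : List Int} (h : AscAt ns i w) :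
    i + w.length ≤ ns.length ∧ w = (ns.drop i).take w.length ∧ w.IsChain (· < ·) := by
  obtain ⟨u, v, hns, hu, hc⟩ := h
  subst hu
  refine ⟨by rw [hns]; simp, ?_, hc⟩
  rw [hns, List.append_assoc, List.drop_left, List.take_left]

theorem ascAt_intro (ns : List Int) (i k : Nat) (hik : i + k ≤ ns.length)
    (hc : ((ns.drop i).take k).IsChain (· < ·)) : AscAt ns i ((ns.drop i).take k) := by
  refine ⟨ns.take i, ns.drop (i + k), ?_, by simp; omega, hc⟩
  have hd : ns.drop (i + k) = (ns.drop i).drop k := by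
    rw [List.drop_drop, Nat.add_comm]
  rw [hd, List.append_assoc, List.take_append_drop, List.take_append_drop]

theorem pspec_unique (ns o1 o2 : List Int) (h1 : PSpec ns o1) (h2 : PSpec ns o2) : o1 = o2 := by
  rcases h1 with ⟨e1, b1⟩ | ⟨hl1, i1, a1, m1, f1⟩ <;>
    rcases h2 with ⟨e2, b2⟩ | ⟨hl2, i2, a2, m2, f2⟩
  · rw [e1, e2]
  · exact absurd (b1 _ _ a2) (by omega)
  · exact absurd (b2 _ _ a1) (by omega)
  · have hL : o1.length = o2.length := le_antisymm (m2 _ _ a1) (m1 _ _ a2)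
    have hi : i1 = i2 := le_antisymm (f1 _ _ a2 hL.symm) (f2 _ _ a1 hL)
    have e1 := (ascAt_elim a1).2.1
    have e2 := (ascAt_elim a2).2.1
    rw [e1, e2, hL, hi]

-- ---------- B side ----------

-- the run is a strictly ascending suffix that cannot be extended to the left
def RunInv (p run : List Int) : Prop :=
  ∃ q, p = q ++ run ∧ run ≠ [] ∧ run.IsChain (· < ·) ∧
    ∀ a b, q.getLast? = some a → run.head? = some b → ¬ a < b

-- the best is the leftmost longest strictly ascending window of the processed prefix
def BestInv (p best : List Int) : Prop :=
  ∃ i, AscAt p i best ∧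
    (∀ j w, AscAt p j w → w.length ≤ best.length) ∧
    (∀ j w, AscAt p j w → w.length = best.length → i ≤ j)

def InvB (p : List Int) (st : List Int × List Int × Option Int) : Prop :=
  ((p = [] ∧ st = ([], [], none)) ∨ (p ≠ [] ∧ st.2.2 = p.getLast? ∧ RunInv p st.2.1)) ∧
    BestInv p st.1

theorem suffix_le_run {p run s : List Int} (hR : RunInv p run)
    (hs : s <:+ p) (hchain : s.IsChain (· < ·)) : s.length ≤ run.length := by
  obtain ⟨q, hp, hrne, hrc, hblock⟩ := hR
  by_contra hlt
  push_neg at hlt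
  have hrs : run <:+ s := List.suffix_of_suffix_length_le ⟨q, hp.symm⟩ hs (le_of_lt hlt)
  obtain ⟨t, hts⟩ := hrs
  have htne : t ≠ [] := by
    intro h0
    rw [h0, List.nil_append] at hts
    rw [hts] at hlt
    omega
  obtain ⟨u, hup⟩ := hs
  have hq : q = u ++ t := by
    have : (u ++ t) ++ run = q ++ run := by
      rw [List.append_assoc, hts, hup, hp]
    exact ((List.append_inj' this rfl).1).symm
  have hrel := (List.isChain_append.mp (hts ▸ hchain)).2.2
  obtain ⟨b, b0, hb0⟩ := List.exists_cons_of_ne_nil hrne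
  have hhead : run.head? = some b := by rw [hb0]; rfl
  have hlast : q.getLast? = some (t.getLast htne) := by
    rw [hq, List.getLast?_append_of_ne_nil u htne]
    exact List.getLast?_eq_some_getLast htne
  exact hblock _ _ hlast hhead
    (hrel _ (by rw [List.getLast?_eq_some_getLast htne]; rfl) _ (by rw [hhead]; rfl))

theorem ascAt_snoc {p : List Int} {x : Int} {j : Nat} {w : List Int} (h : AscAt (p ++ [x]) j w) :
    AscAt p j w ∨ (j + w.length = p.length + 1 ∧ w <:+ (p ++ [x]) ∧ w.IsChain (· < ·)) := by
  obtain ⟨u, v, hns, hu, hc⟩ := h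
  rcases List.eq_nil_or_concat v with rfl | ⟨v0, z, rfl⟩
  · right
    refine ⟨?_, ⟨u, by rw [hns]; simp⟩, hc⟩
    have := congrArg List.length hns
    simp at this; omega
  · left
    have heq : (u ++ w ++ v0) ++ [z] = p ++ [x] := by
      rw [hns, List.concat_eq_append]
      simp [List.append_assoc]
    exact ⟨u, v0, ((List.append_inj' heq rfl).1).symm, hu, hc⟩

theorem ascAt_snoc_intro {p : List Int} (x : Int) {j : Nat} {w : List Int} (h : AscAt p j w) :
    AscAt (p ++ [x]) j w := by
  obtain ⟨u, v, hns, hu, hc⟩ := h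
  exact ⟨u, v ++ [x], by rw [hns]; simp, hu, hc⟩

theorem runInv_snoc_lt {p run : List Int} {x a : Int} (hR : RunInv p run)
    (ha : p.getLast? = some a) (hax : a < x) : RunInv (p ++ [x]) (run ++ [x]) := by
  obtain ⟨q, hp, hrne, hrc, hblock⟩ := hR
  refine ⟨q, by rw [hp]; simp, by simp, ?_, ?_⟩
  · refine List.isChain_append.mpr ⟨hrc, by simp, ?_⟩
    intro y hy z hz
    have hlast : run.getLast? = some a := by
      rw [hp, List.getLast?_append_of_ne_nil q hrne] at ha; exact ha
    rw [hlast] at hy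
    simp at hy hz
    omega
  · intro a' b' ha' hb'
    rw [List.head?_append_of_ne_nil run hrne] at hb'
    exact hblock a' b' ha' hb'

theorem runInv_snoc_new {p : List Int} {x a : Int} (ha : p.getLast? = some a) (hax : ¬ a < x) :
    RunInv (p ++ [x]) [x] := by
  refine ⟨p, rfl, by simp, by simp, ?_⟩
  intro a' b' ha' hb'
  rw [ha] at ha'; simp at ha' hb'
  omega

theorem bestInv_step (p best run' : List Int) (x : Int)
    (hB : BestInv p best) (hR : RunInv (p ++ [x]) run') :
    BestInv (p ++ [x]) (if best.length < run'.length then run' else best) := by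
  obtain ⟨i, ha, hmax, hleft⟩ := hB
  obtain ⟨q', hq', hrne, hrc, hbl⟩ := hR
  have hq'len : q'.length + run'.length = p.length + 1 := by
    have := congrArg List.length hq'
    simp at this; omega
  have hrunAt : AscAt (p ++ [x]) q'.length run' := ⟨q', [], by rw [hq']; simp, rfl, hrc⟩
  have hsuffmax : ∀ j w, AscAt (p ++ [x]) j w → w.length ≤ best.length ∨ w.length ≤ run'.length := by
    intro j w hw
    rcases ascAt_snoc hw with h | ⟨hj, hsuf, hc⟩
    · exact Or.inl (hmax _ _ h)
    · exact Or.inr (suffix_le_run ⟨q', hq', hrne, hrc, hbl⟩ hsuf hc)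
  split_ifs with hlt
  · refine ⟨q'.length, hrunAt, ?_, ?_⟩
    · intro j w hw
      rcases hsuffmax j w hw with h | h <;> omega
    · intro j w hw hlen
      rcases ascAt_snoc hw with h | ⟨hj, _, _⟩
      · exact absurd (hmax _ _ h) (by omega)
      · omega
  · refine ⟨i, ascAt_snoc_intro x ha, ?_, ?_⟩
    · intro j w hw
      rcases hsuffmax j w hw with h | h <;> omega
    · intro j w hw hlen
      rcases ascAt_snoc hw with h | ⟨hj, _, _⟩
      · exact hleft _ _ h hlen
      · have hib : i + best.length ≤ p.length := (ascAt_elim ha).1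
        omega

theorem bestInv_nil : BestInv [] [] := by
  refine ⟨0, ⟨[], [], rfl, rfl, by simp⟩, ?_, ?_⟩
  · intro j w hw
    have h := (ascAt_elim hw).1
    simp only [List.length_nil] at h ⊢
    omega
  · intro j w hw hlen
    omega

theorem invB_step (p : List Int) (x : Int) (st : List Int × List Int × Option Int)
    (h : InvB p st) : InvB (p ++ [x]) (stepB st x) := by
  obtain ⟨best, run, prev⟩ := st
  obtain ⟨hpr, hbest⟩ := h
  rcases hpr with ⟨rfl, hst⟩ | ⟨hpne, hprev, hrun⟩
  · simp only [Prod.mk.injEq] at hst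
    obtain ⟨rfl, rfl, rfl⟩ := hst
    have hrun' : RunInv ([] ++ [x]) [x] := ⟨[], rfl, by simp, by simp, by simp⟩
    have hb := bestInv_step [] [] [x] x bestInv_nil hrun'
    have hstep : stepB (([] : List Int), ([] : List Int), (none : Option Int)) x
        = ([x], [x], some x) := rfl
    rw [hstep]
    refine ⟨Or.inr ⟨by simp, by simp, hrun'⟩, ?_⟩
    simpa using hb
  · simp only at hprev hrun hbest
    have ha : p.getLast? = some (p.getLast hpne) := List.getLast?_eq_some_getLast hpne
    have hprev' : prev = some (p.getLast hpne) := by rw [hprev, ha]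
    subst hprev'
    by_cases hax : p.getLast hpne < x
    · have hrun' : RunInv (p ++ [x]) (run ++ [x]) := runInv_snoc_lt hrun ha hax
      have hb := bestInv_step p best (run ++ [x]) x hbest hrun'
      simp only [stepB, hax, if_true]
      exact ⟨Or.inr ⟨by simp, by rw [List.getLast?_concat], hrun'⟩, hb⟩
    · have hrun' : RunInv (p ++ [x]) [x] := runInv_snoc_new ha hax
      have hb := bestInv_step p best [x] x hbest hrun'
      simp only [stepB, hax, if_false]
      exact ⟨Or.inr ⟨by simp, by rw [List.getLast?_concat], hrun'⟩, hb⟩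

theorem invB_foldl (ns : List Int) : InvB ns (ns.foldl stepB ([], [], none)) := by
  induction ns using List.reverseRecOn with
  | nil => exact ⟨Or.inl ⟨rfl, rfl⟩, bestInv_nil⟩
  | append_singleton p x ih =>
    rw [List.foldl_append]
    exact invB_step p x _ ih

theorem pspec_B (ns : List Int) : PSpec ns (longest_ascending_sublist_alt ns) := by
  obtain ⟨hpr, ⟨i, ha, hmax, hleft⟩⟩ := invB_foldl ns
  unfold longest_ascending_sublist_alt
  by_cases h2 : 2 ≤ (ns.foldl stepB ([], [], none)).1.length
  · simp only [h2, if_true]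
    exact Or.inr ⟨h2, i, ha, hmax, hleft⟩
  · simp only [h2, if_false]
    exact Or.inl ⟨rfl, fun j w hw => le_trans (hmax j w hw) (by omega)⟩

-- ---------- A side ----------

-- the group of strictly ascending windows of length k, in left-to-right order
def grpA (ns : List Int) (k : Nat) : List (List Int) :=
  ((List.range (ns.length - k + 1)).map (fun i => (ns.drop i).take k)).filter ascendingA

theorem ascLoopA_iff (f : Int) (l : List Int) :
    ascLoopA f l = true ↔ (f :: l).IsChain (· < ·) := by
  induction l generalizing f with
  | nil => simp [ascLoopA]
  | cons n rest ih =>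
    rw [List.isChain_cons_cons]
    by_cases h : f ≥ n
    · have hnf : ¬ f < n := by omega
      simp [ascLoopA, h, hnf]
    · have hfn : f < n := by omega
      simp [ascLoopA, h, ih, hfn]

theorem ascendingA_iff (w : List Int) :
    ascendingA w = true ↔ 2 ≤ w.length ∧ w.IsChain (· < ·) := by
  match w with
  | [] => simp [ascendingA]
  | [a] => simp [ascendingA]
  | a :: b :: rest =>
    have hlen : ¬((a :: b :: rest).length ≤ 1) := by simp
    simp only [ascendingA, hlen, if_false]
    rw [ascLoopA_iff]
    simp

theorem getWinsA_eq (ns : List Int) (k : Nat) (hk : k ≤ ns.length) :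
    getWinsA (k : Int) ns = (List.range (ns.length - k + 1)).map (fun i => (ns.drop i).take k) := by
  unfold getWinsA
  rw [PySem.List.pyRange_one]
  have hb : (((ns.length : Int) - (k : Int) + 1) - 0).toNat = ns.length - k + 1 := by omega
  rw [hb, List.foldl_map, PySem.List.foldl_append_singleton_eq_map, List.nil_append]
  apply List.map_congr_left
  intro i _
  have h1 : (0 : Int) + (i : Int) = ((i : Nat) : Int) := by omega
  rw [h1, PySem.List.slice_natCast_add]

theorem ascs_eq (ns : List Int) :
    ascendingSublistsA ns = (List.range' 1 ns.length).flatMap (grpA ns) := by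
  by_cases hne : ns = []
  · subst hne; rfl
  · have hn1 : 1 ≤ ns.length := List.length_pos_iff.mpr hne
    unfold ascendingSublistsA
    rw [PySem.List.foldl_append_if_eq_filter]
    unfold sublistsA
    simp only [hne, ne_eq, not_false_iff, if_true]
    rw [PySem.List.pyRange_one]
    have hb : ((ns.length : Int) - 1).toNat = ns.length - 1 := by omega
    rw [hb, List.foldl_map, PySem.List.foldl_append_eq_flatMap]
    have hwins : ∀ j ∈ List.range (ns.length - 1),
        getWinsA (1 + (j : Int)) ns = (List.range (ns.length - (1 + j) + 1)).map
          (fun i => (ns.drop i).take (1 + j)) := by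
      intro j hj
      rw [List.mem_range] at hj
      have h1 : (1 : Int) + (j : Int) = (((1 + j : Nat)) : Int) := by omega
      rw [h1, getWinsA_eq ns (1 + j) (by omega)]
    rw [List.flatMap_congr hwins]
    rw [List.nil_append, List.filter_append, List.filter_append, List.filter_flatMap]
    have h0 : List.filter ascendingA [([] : List Int)] = [] := by rfl
    rw [h0, List.nil_append]
    have hsplit : List.range' 1 ns.length = List.range' 1 (ns.length - 1) ++ [ns.length] := by
      have h := List.range'_1_concat (s := 1) (n := ns.length - 1)
      have e1 : ns.length - 1 + 1 = ns.length := by omega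
      have e2 : 1 + (ns.length - 1) = ns.length := by omega
      rw [e1, e2] at h
      exact h
    rw [hsplit, List.flatMap_append]
    congr 1
    · rw [List.range'_eq_map_range, List.flatMap_map]
      apply List.flatMap_congr
      intro j _
      simp [grpA]
    · simp only [List.flatMap_cons, List.flatMap_nil, List.append_nil]
      unfold grpA
      have : ns.length - ns.length + 1 = 1 := by omega
      rw [this]
      simp

theorem grpA_mem {ns : List Int} {k : Nat} {w : List Int} (hk : k ≤ ns.length)
    (hw : w ∈ grpA ns k) :
    w.length = k ∧ 2 ≤ w.length ∧ w.IsChain (· < ·) ∧ ∃ i, AscAt ns i w := by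
  unfold grpA at hw
  rw [List.mem_filter] at hw
  obtain ⟨hmem, hasc⟩ := hw
  rw [List.mem_map] at hmem
  obtain ⟨i, hi, hwin⟩ := hmem
  rw [List.mem_range] at hi
  have hik : i + k ≤ ns.length := by omega
  have hlen : w.length = k := by
    rw [← hwin]; simp; omega
  rw [ascendingA_iff] at hasc
  refine ⟨hlen, hasc.1, hasc.2, i, ?_⟩
  rw [← hwin]
  exact ascAt_intro ns i k hik (hwin ▸ hasc.2)

theorem mem_grpA_of_ascAt {ns : List Int} {j : Nat} {w : List Int} (h : AscAt ns j w)
    (h2 : 2 ≤ w.length) : w ∈ grpA ns w.length := by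
  obtain ⟨hjk, hwin, hc⟩ := ascAt_elim h
  unfold grpA
  rw [List.mem_filter]
  constructor
  · rw [List.mem_map]
    exact ⟨j, by rw [List.mem_range]; omega, hwin.symm⟩
  · rw [ascendingA_iff]; exact ⟨h2, hc⟩

-- the while loop stops at the first element of the final equal-length block
theorem lasIdxA_spec (pre g : List (List Int)) (L : Nat)
    (hpre : ∀ w ∈ pre, w.length < L) (hg : ∀ w ∈ g, w.length = L) :
    ∀ m, m < g.length → lasIdxA (pre ++ g) (pre.length + m) = pre.length := by
  have hgetg : ∀ m, m < g.length → ((pre ++ g).getD (pre.length + m) []).length = L := by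
    intro m hm
    rw [List.getD_eq_getElem?_getD, List.getElem?_append_right (by omega)]
    have e : pre.length + m - pre.length = m := by omega
    rw [e, List.getElem?_eq_getElem hm]
    exact hg _ (List.getElem_mem hm)
  intro m
  induction m with
  | zero =>
    intro hm
    rcases Nat.eq_zero_or_pos pre.length with hp | hp
    · rw [Nat.add_zero, hp]
      rfl
    · obtain ⟨t, ht⟩ : ∃ t, pre.length = t + 1 := ⟨pre.length - 1, by omega⟩
      have h1 : ((pre ++ g).getD (pre.length + 0) []).length = L := hgetg 0 hm
      have h2 : ((pre ++ g).getD t []).length < L := by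
        rw [List.getD_eq_getElem?_getD, List.getElem?_append_left (by omega),
          List.getElem?_eq_getElem (by omega)]
        exact hpre _ (List.getElem_mem (by omega))
      rw [Nat.add_zero, ht] at h1 ⊢
      unfold lasIdxA
      rw [if_neg (by omega)]
  | succ m ih =>
    intro hm
    have h1 : ((pre ++ g).getD (pre.length + m + 1) []).length = L := by
      have h := hgetg (m + 1) hm
      rw [← Nat.add_assoc] at h
      exact h
    have h2 : ((pre ++ g).getD (pre.length + m) []).length = L := hgetg m (by omega)
    have hstep : pre.length + (m + 1) = (pre.length + m) + 1 := by omega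
    rw [hstep]
    unfold lasIdxA
    rw [if_pos (by omega)]
    exact ih (by omega)

theorem pspec_A (ns : List Int) : PSpec ns (longest_ascending_sublist ns) := by
  unfold longest_ascending_sublist
  by_cases hasc : ascendingSublistsA ns = []
  · simp only [hasc, ne_eq, not_true_eq_false, if_false]
    left
    refine ⟨rfl, ?_⟩
    intro j w hw
    by_contra hlen
    push_neg at hlen
    have h2 : 2 ≤ w.length := by omega
    have hmem := mem_grpA_of_ascAt hw h2
    have hjk := (ascAt_elim hw).1
    have hk : w.length ∈ List.range' 1 ns.length := by
      rw [List.mem_range'_1]; omega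
    have : w ∈ ascendingSublistsA ns := by
      rw [ascs_eq]
      exact List.mem_flatMap.mpr ⟨w.length, hk, hmem⟩
    rw [hasc] at this
    exact absurd this (List.not_mem_nil)
  · simp only [hasc, ne_eq, not_false_iff, if_true]
    -- the maximal k with a nonempty group
    set ks := (List.range' 1 ns.length).filter (fun k => !(grpA ns k).isEmpty) with hks_def
    have hks_ne : ks ≠ [] := by
      have : ∃ w, w ∈ ascendingSublistsA ns := by
        rcases List.exists_mem_of_ne_nil _ hasc with ⟨w, hw⟩
        exact ⟨w, hw⟩
      obtain ⟨w, hw⟩ := this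
      rw [ascs_eq] at hw
      obtain ⟨k, hk, hwk⟩ := List.mem_flatMap.mp hw
      intro h0
      have : k ∈ ks := by
        rw [hks_def, List.mem_filter]
        refine ⟨hk, ?_⟩
        simp
        exact List.ne_nil_of_mem hwk
      rw [h0] at this
      exact absurd this (List.not_mem_nil)
    obtain ⟨M, hM⟩ : ∃ M, ks.max? = some M := by
      cases h : ks.max? with
      | none => exact absurd (List.max?_eq_none_iff.mp h) hks_ne
      | some M => exact ⟨M, rfl⟩
    have hMmem : M ∈ ks := List.max?_mem hM
    have hMmax : ∀ k ∈ ks, k ≤ M := (List.max?_le_iff hM).mp le_rfl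
    have hMrange : M ∈ List.range' 1 ns.length := (List.mem_filter.mp hMmem).1
    have hMg : grpA ns M ≠ [] := by
      have := (List.mem_filter.mp hMmem).2
      simp at this
      exact this
    rw [List.mem_range'_1] at hMrange
    have hM1 : 1 ≤ M := hMrange.1
    have hMn : M ≤ ns.length := by omega
    -- split the k-range at M
    have hgrp_hi : ∀ k ∈ List.range' (M + 1) (ns.length - M), grpA ns k = [] := by
      intro k hk
      rw [List.mem_range'_1] at hk
      by_contra h0
      have : k ∈ ks := by
        rw [hks_def, List.mem_filter]
        refine ⟨by rw [List.mem_range'_1]; omega, ?_⟩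
        simp
        exact h0
      have := hMmax k this
      omega
    have hsplit : List.range' 1 ns.length =
        (List.range' 1 (M - 1) ++ [M]) ++ List.range' (M + 1) (ns.length - M) := by
      have h1 : List.range' 1 (M - 1) ++ [M] = List.range' 1 M := by
        have h := List.range'_1_concat (s := 1) (n := M - 1)
        have e1 : M - 1 + 1 = M := by omega
        have e2 : 1 + (M - 1) = M := by omega
        rw [e1, e2] at h
        exact h.symm
      rw [h1]
      have h2 := List.range'_append (s := 1) (m := M) (n := ns.length - M) (step := 1)
      simp only [Nat.one_mul] at h2
      have e3 : M + (ns.length - M) = ns.length := by omega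
      have e4 : 1 + M = M + 1 := by omega
      rw [e3, e4] at h2
      exact h2.symm
    have hascs : ascendingSublistsA ns =
        (List.range' 1 (M - 1)).flatMap (grpA ns) ++ grpA ns M := by
      rw [ascs_eq, hsplit, List.flatMap_append, List.flatMap_append]
      have hnil : (List.range' (M + 1) (ns.length - M)).flatMap (grpA ns) = [] := by
        rw [List.flatMap_eq_nil_iff]
        exact hgrp_hi
      rw [hnil, List.append_nil]
      simp
    set pre := (List.range' 1 (M - 1)).flatMap (grpA ns) with hpre_def
    set g := grpA ns M with hg_def
    have hpre : ∀ w ∈ pre, w.length < M := by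
      intro w hw
      obtain ⟨k, hk, hwk⟩ := List.mem_flatMap.mp hw
      rw [List.mem_range'_1] at hk
      have := (grpA_mem (k := k) (by omega) hwk).1
      omega
    have hg : ∀ w ∈ g, w.length = M := fun w hw => (grpA_mem hMn hw).1
    have hgne : g ≠ [] := hMg
    have hglen : 1 ≤ g.length := List.length_pos_iff.mpr hgne
    -- run the while loop
    have hlen : (ascendingSublistsA ns).length - 1 = pre.length + (g.length - 1) := by
      rw [hascs, List.length_append]; omega
    rw [hlen, hascs, lasIdxA_spec pre g M hpre hg (g.length - 1) (by omega)]
    obtain ⟨w0, hw0⟩ : ∃ w0, g.head? = some w0 := by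
      cases hh : g.head? with
      | none => exact absurd (List.head?_eq_none_iff.mp hh) hgne
      | some w0 => exact ⟨w0, rfl⟩
    have hw0mem : w0 ∈ g := List.mem_of_mem_head? (by rw [hw0]; rfl)
    have hget : (pre ++ g).getD pre.length [] = w0 := by
      rw [List.getD_eq_getElem?_getD, List.getElem?_append_right le_rfl, Nat.sub_self,
        ← List.head?_eq_getElem?, hw0]
      rfl
    rw [hget]
    obtain ⟨hw0len, hw02, hw0chain, _⟩ := grpA_mem hMn hw0mem
    right
    refine ⟨by omega, ?_⟩
    -- identify the position of w0 via find?
    rw [hg_def] at hw0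
    unfold grpA at hw0
    rw [List.head?_filter, List.find?_map] at hw0
    obtain ⟨i0, hfind, hf0⟩ := Option.map_eq_some_iff.mp hw0
    obtain ⟨hP0, l1, l2, hrange, hl1⟩ := List.find?_eq_some_iff_append.mp hfind
    have hlens : ns.length - M + 1 = l1.length + 1 + l2.length := by
      have h := congrArg List.length hrange
      simp at h
      omega
    have hi0len : i0 = l1.length := by
      have h1 : (List.range (ns.length - M + 1))[l1.length]? = some i0 := by
        rw [hrange, List.getElem?_append_right le_rfl, Nat.sub_self]
        rfl
      rw [List.getElem?_range (by omega)] at h1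
      exact (Option.some_inj.mp h1).symm
    have hi0lt : i0 < ns.length - M + 1 := by omega
    have hnotbefore : ∀ j < i0, ¬ (ascendingA ((ns.drop j).take M) = true) := by
      intro j hj
      have hjmem : j ∈ l1 := by
        have h2 : (List.range (ns.length - M + 1))[j]? = some j :=
          List.getElem?_range (by omega)
        rw [hrange, List.getElem?_append_left (by omega)] at h2
        exact List.mem_of_getElem? h2
      have h := hl1 j hjmem
      simp only [Function.comp, Bool.not_eq_true'] at h
      simp [h]
    have hw0win : w0 = (ns.drop i0).take M := hf0.symm
    have hAsc0 : AscAt ns i0 w0 := by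
      rw [hw0win]
      exact ascAt_intro ns i0 M (by omega) (hw0win ▸ hw0chain)
    refine ⟨i0, hAsc0, ?_, ?_⟩
    · -- maximality
      intro j w hw
      by_cases h1 : w.length ≤ 1
      · omega
      · have hmem := mem_grpA_of_ascAt hw (by omega)
        have hjk := (ascAt_elim hw).1
        have hwks : w.length ∈ ks := by
          rw [hks_def, List.mem_filter]
          refine ⟨by rw [List.mem_range'_1]; omega, ?_⟩
          simp
          exact List.ne_nil_of_mem hmem
        have := hMmax _ hwks
        omega
    · -- leftmostness
      intro j w hw hwlen
      by_contra hji
      push_neg at hji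
      obtain ⟨hjk, hwin, hc⟩ := ascAt_elim hw
      rw [hw0len] at hwlen
      apply hnotbefore j hji
      rw [ascendingA_iff]
      rw [hwlen] at hwin
      refine ⟨?_, by rw [← hwin]; exact hc⟩
      rw [← hwin]
      omega

-- ===== VERDICT (by name: the statement is the Claim_ definition above) =====
theorem longest_ascending_sublist_spec : Claim_equal_longest_ascending_sublist := by
  intro ns _
  unfold Spec_longest_ascending_sublist
  exact pspec_unique ns _ _ (pspec_A ns) (pspec_B ns)
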